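-- pv_equiv track=rewrite | github.com/Yash25gupta/Python | Challanges nextgencoder/52 Common Char having similar sequence.py | cc52
-- ===== SOURCE A (Python) =====
-- def cc52(txt1, txt2):
--     stxt, ltxt = (txt1, txt2) if len(txt1) < len(txt2) else (txt2, txt1)
--     common = [(0, -1)]
--     for i in stxt:
--         if i in ltxt:
--             nxtIndex = common[-1][1] + 1
--             if nxtIndex != 0 or len(common) == 1:
--                 common.append((i, ltxt.find(i, nxtIndex)))
--     return common[1:]
-- ===== SOURCE B (Python) =====
-- def cc52(txt1, txt2):
--     stxt, ltxt = (txt1, txt2) if len(txt1) < len(txt2) else (txt2, txt1)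
--     pos = {}
--     for j, c in enumerate(ltxt):
--         pos.setdefault(c, []).append(j)
--     cur = {}
--     out = []
--     nxt = 0
--     for c in stxt:
--         lst = pos.get(c)
--         if lst is None:
--             continue
--         k = cur.get(c, 0)
--         while k < len(lst) and lst[k] < nxt:
--             k += 1
--         cur[c] = k
--         if k < len(lst):
--             out.append((c, lst[k]))
--             nxt = lst[k] + 1
--         else:
--             out.append((c, -1))
--             break
--     return out
-- ===== Notes on version B (the rewrite author's own statement) =====
-- stated objective: alternative
-- what changed: B builds a char-to-occurrence-index dictionary from ltxt in one pass and walks stxt consuming each character's index list past the moving cursor (breaking at the first miss), instead of A's repeated ltxt.find substring scans driven by the sentinel-and-last-element trick.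
import Mathlib
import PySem

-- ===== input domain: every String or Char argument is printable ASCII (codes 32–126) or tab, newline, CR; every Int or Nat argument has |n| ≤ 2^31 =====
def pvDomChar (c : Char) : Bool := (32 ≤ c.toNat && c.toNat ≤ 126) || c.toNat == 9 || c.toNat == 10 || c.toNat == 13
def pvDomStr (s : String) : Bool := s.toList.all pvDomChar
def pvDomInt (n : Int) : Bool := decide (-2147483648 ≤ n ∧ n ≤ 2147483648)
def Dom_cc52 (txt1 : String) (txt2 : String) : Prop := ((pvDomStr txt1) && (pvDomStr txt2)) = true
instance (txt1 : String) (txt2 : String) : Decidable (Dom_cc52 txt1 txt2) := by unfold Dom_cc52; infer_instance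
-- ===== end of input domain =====

-- B replaces A's repeated ltxt.find scans by a one-pass char→occurrence-index dictionary whose
-- per-character index lists are consumed left to right (an alternative algorithm, not claimed faster).

-- ===== PORT A =====
-- Python's sentinel entry (0, -1) is a heterogeneous (int, int) tuple; it is ported as ("", -1):
-- only its second component and the list length are ever read, and common[1:] drops it.
def cc52 (txt1 : String) (txt2 : String) : List (String × Int) :=
  let st := if PySem.Str.len txt1 < PySem.Str.len txt2 then (txt1, txt2) else (txt2, txt1)
  let common := st.1.toList.foldl (fun common i =>
    if PySem.Str.isIn (String.ofList [i]) st.2 then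
      let nxtIndex := (common.getLastD ("", -1)).2 + 1
      if nxtIndex ≠ 0 ∨ common.length = 1 then
        common ++ [(String.ofList [i], PySem.Str.findFrom st.2 (String.ofList [i]) nxtIndex)]
      else common
    else common) [("", -1)]
  PySem.List.slice common (some 1) none

-- ===== PORT B =====
-- the 'while k < len(lst) and lst[k] < nxt: k += 1' cursor advance of Source B
def cc52AltSkip (lst : List Int) (nxt : Int) (k : Nat) : Nat :=
  if h : k < lst.length then
    if lst[k] < nxt then cc52AltSkip lst nxt (k + 1) else k
  else k
  termination_by lst.length - k

-- the 'for c in stxt' loop of Source B, with break: pos maps each char of ltxt to its occurrence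
-- indices, cur holds each character's consumed-prefix cursor
def cc52AltLoop (pos : PySem.Dict Char (List Int)) : List Char → Int → PySem.Dict Char Nat → List (String × Int)
  | [], _, _ => []
  | c :: rest, nxt, cur =>
    match pos.get? c with
    | none => cc52AltLoop pos rest nxt cur
    | some lst =>
      let k := cc52AltSkip lst nxt (cur.getD c 0)
      let cur' := cur.insert c k
      if hk : k < lst.length then
        (String.ofList [c], lst[k]) :: cc52AltLoop pos rest (lst[k] + 1) cur'
      else [(String.ofList [c], -1)]

def cc52_alt (txt1 : String) (txt2 : String) : List (String × Int) :=
  let st := if PySem.Str.len txt1 < PySem.Str.len txt2 then (txt1, txt2) else (txt2, txt1)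
  let pos := (PySem.List.enumerate st.2.toList 0).foldl
    (fun d p => d.modify p.2 [] (fun lst => lst ++ [p.1])) PySem.Dict.empty
  cc52AltLoop pos st.1.toList 0 PySem.Dict.empty

-- ===== PRECONDITION & SPEC =====
def Spec_cc52 (txt1 : String) (txt2 : String) (out : List (String × Int)) : Prop := out = cc52_alt txt1 txt2
instance (txt1 : String) (txt2 : String) (out : List (String × Int)) : Decidable (Spec_cc52 txt1 txt2 out) := by unfold Spec_cc52; infer_instance

-- ===== CLAIM (what is proved, stated in full; the proofs are below) =====
def Claim_equal_cc52 : Prop := ∀ (txt1 : String) (txt2 : String), Dom_cc52 txt1 txt2 → Spec_cc52 txt1 txt2 (cc52 txt1 txt2)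

-- ===== LEMMAS AND PROOFS =====

-- indices (as Python ints) at which c occurs in l, in increasing order
def pvOcc (l : List Char) (c : Char) : List Int :=
  ((PySem.List.enumerate l 0).filter (fun p => p.2 == c)).map (fun p => p.1)

-- the common core both loops compute: chase successive occurrences, stop after the first miss
def pvChase (l : List Char) : List Char → Int → List (String × Int)
  | [], _ => []
  | c :: rest, nxt =>
    if c ∈ l then
      match (pvOcc l c).dropWhile (fun j => decide (j < nxt)) with
      | [] => [(String.ofList [c], -1)]
      | h :: _ => (String.ofList [c], h) :: pvChase l rest (h + 1)
    else pvChase l rest nxt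

-- A's loop body, named so the fold can be reasoned about
def pvAStep (L : String) (common : List (String × Int)) (i : Char) : List (String × Int) :=
  if PySem.Str.isIn (String.ofList [i]) L then
    let nxtIndex := (common.getLastD ("", -1)).2 + 1
    if nxtIndex ≠ 0 ∨ common.length = 1 then
      common ++ [(String.ofList [i], PySem.Str.findFrom L (String.ofList [i]) nxtIndex)]
    else common
  else common

theorem pv_mem_occ {l : List Char} {c : Char} {j : Int} :
    j ∈ pvOcc l c ↔ ∃ (k : Nat) (h : k < l.length), j = (k : Int) ∧ l[k] = c := by
  simp only [pvOcc, List.mem_map, List.mem_filter, PySem.List.mem_enumerate_iff]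
  constructor
  · rintro ⟨p, ⟨⟨k, hk, rfl⟩, hc⟩, rfl⟩
    refine ⟨k, hk, by simp, by simpa using hc⟩
  · rintro ⟨k, hk, rfl, hc⟩
    exact ⟨((k : Int), c), ⟨⟨k, hk, by simp [hc]⟩, by simp⟩, by simp⟩

theorem pv_pairwise_occ (l : List Char) (c : Char) : (pvOcc l c).Pairwise (· < ·) := by
  refine List.Pairwise.map _ (fun p q h => h) ?_
  exact (PySem.List.pairwise_lt_enumerate l 0).sublist List.filter_sublist

theorem pv_dropWhile_dropWhile {α : Type} (p q : α → Bool)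
    (h : ∀ x, p x = true → q x = true) (l : List α) :
    (l.dropWhile p).dropWhile q = l.dropWhile q := by
  induction l with
  | nil => rfl
  | cons x t ih =>
    by_cases hp : p x = true
    · simp [hp, h x hp, ih]
    · simp [List.dropWhile_cons, hp]

theorem pv_singleton_prefix_drop {c : Char} {l : List Char} {k : Nat} :
    [c] <+: l.drop k ↔ ∃ h : k < l.length, l[k] = c := by
  constructor
  · rintro ⟨t, ht⟩
    have hk : k < l.length := by
      by_contra hnk
      have : l.drop k = [] := List.drop_eq_nil_of_le (by omega)
      simp [this] at ht
    have hlen : 0 < (l.drop k).length := by simpa using hk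
    refine ⟨hk, ?_⟩
    have := List.getElem_drop (xs := l) (i := k) (j := 0) (h := hlen)
    have h0 : (l.drop k)[0]'hlen = c := by
      have : l.drop k = c :: t := by simpa using ht.symm
      simp [this]
    rw [← h0, this]; simp
  · rintro ⟨hk, hc⟩
    refine ⟨(l.drop (k+1)), ?_⟩
    rw [← List.getElem_cons_drop (as := l) (i := k) hk]
    simp [hc]

theorem pv_head_occ {l : List Char} {c : Char} {nxt h : Int} {t : List Int}
    (hd : (pvOcc l c).dropWhile (fun j => decide (j < nxt)) = h :: t) :
    h ∈ pvOcc l c ∧ nxt ≤ h ∧ 0 ≤ h ∧ h < (l.length : Int) := by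
  have hmem : h ∈ pvOcc l c := (List.dropWhile_sublist _).mem (by rw [hd]; simp)
  have hnp : (fun j => decide (j < nxt)) h = false := by
    have := List.head_dropWhile_not (fun j => decide (j < nxt)) (l := pvOcc l c) (w := by simp [hd])
    simpa [hd] using this
  obtain ⟨k, hk, rfl, _⟩ := pv_mem_occ.mp hmem
  refine ⟨hmem, by simpa using hnp, by positivity, by exact_mod_cast hk⟩

-- minimality: any occurrence index ≥ nxt is ≥ the head of the undropped suffix
theorem pv_head_min {l : List Char} {c : Char} {nxt h : Int} {t : List Int}
    (hd : (pvOcc l c).dropWhile (fun j => decide (j < nxt)) = h :: t)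
    {j : Int} (hj : j ∈ pvOcc l c) (hjn : nxt ≤ j) : h ≤ j := by
  have hsplit := List.takeWhile_append_dropWhile (p := fun j => decide (j < nxt)) (l := pvOcc l c)
  rw [← hsplit] at hj
  rcases List.mem_append.mp hj with hj | hj
  · have := List.mem_takeWhile_imp hj
    simp at this; omega
  · rw [hd] at hj
    rcases List.mem_cons.mp hj with rfl | hj
    · exact le_refl _
    · have hp : (pvOcc l c).Pairwise (· < ·) := pv_pairwise_occ l c
      have : (h :: t).Pairwise (· < ·) := by
        rw [← hd]; exact hp.sublist (List.dropWhile_sublist _)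
      exact le_of_lt ((List.pairwise_cons.mp this).1 j hj)

theorem pv_find_eq_nil {l : List Char} {c : Char} {nxt : Int}
    (h0 : 0 ≤ nxt) (hle : nxt ≤ (l.length : Int))
    (hd : (pvOcc l c).dropWhile (fun j => decide (j < nxt)) = []) :
    PySem.Chars.findFrom l [c] nxt = -1 := by
  have hk : nxt = ((nxt.toNat : Nat) : Int) := by omega
  have hkle : nxt.toNat ≤ l.length := by omega
  rw [hk, PySem.Chars.findFrom_natCast_eq_neg_one_iff l [c] nxt.toNat hkle]
  rw [List.singleton_infix_iff]
  intro hc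
  obtain ⟨i, hi, hci⟩ := List.mem_iff_getElem.mp hc
  have hocc : ((nxt.toNat + i : Nat) : Int) ∈ pvOcc l c := by
    refine pv_mem_occ.mpr ⟨nxt.toNat + i, by simp at hi ⊢; omega, rfl, ?_⟩
    rw [← List.getElem_drop (xs := l) (i := nxt.toNat) (j := i) (h := hi)]
    exact hci
  have := List.dropWhile_eq_nil_iff.mp hd _ hocc
  simp at this; omega

theorem pv_find_eq_cons {l : List Char} {c : Char} {nxt h : Int} {t : List Int}
    (h0 : 0 ≤ nxt) (hle : nxt ≤ (l.length : Int))
    (hd : (pvOcc l c).dropWhile (fun j => decide (j < nxt)) = h :: t) :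
    PySem.Chars.findFrom l [c] nxt = h := by
  obtain ⟨hmem, hnh, hh0, hhlen⟩ := pv_head_occ hd
  obtain ⟨k, hk, hhk, hck⟩ := pv_mem_occ.mp hmem
  have hkle : nxt.toNat ≤ l.length := by omega
  have hkc : nxt = ((nxt.toNat : Nat) : Int) := by omega
  have hcmem : c ∈ l.drop nxt.toNat := by
    have hik : k - nxt.toNat < (l.drop nxt.toNat).length := by simp; omega
    refine List.mem_iff_getElem.mpr ⟨k - nxt.toNat, hik, ?_⟩
    rw [List.getElem_drop (xs := l) (i := nxt.toNat) (j := k - nxt.toNat) (h := hik)]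
    have : nxt.toNat + (k - nxt.toNat) = k := by omega
    simp [this, hck]
  have hne : PySem.Chars.findFrom l [c] nxt ≠ -1 := by
    rw [hkc, Ne, PySem.Chars.findFrom_natCast_eq_neg_one_iff l [c] nxt.toNat hkle,
      List.singleton_infix_iff]
    simpa using hcmem
  rw [hkc] at hne ⊢
  obtain ⟨hkr, hpref, hmin⟩ := PySem.Chars.findFrom_natCast_spec l [c] nxt.toNat hkle hne
  set r := PySem.Chars.findFrom l [c] ((nxt.toNat : Nat) : Int) with hr
  obtain ⟨hrlen, hrc⟩ := pv_singleton_prefix_drop.mp hpref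
  have hrocc : ((r.toNat : Nat) : Int) ∈ pvOcc l c := pv_mem_occ.mpr ⟨r.toNat, hrlen, rfl, hrc⟩
  have hrn : nxt ≤ ((r.toNat : Nat) : Int) := by omega
  have hhr : h ≤ ((r.toNat : Nat) : Int) := pv_head_min hd hrocc hrn
  by_contra hne2
  have hlt : h < r := by omega
  have hik : nxt.toNat ≤ h.toNat := by omega
  have hhtn : h.toNat < r.toNat := by omega
  have : ¬ [c] <+: l.drop h.toNat := hmin h.toNat hik hhtn
  exact this (pv_singleton_prefix_drop.mpr ⟨by omega, by
    have : h.toNat = k := by omega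
    simp [this, hck]⟩)

theorem pv_isIn_iff (i : Char) (L : String) :
    PySem.Str.isIn (String.ofList [i]) L = true ↔ i ∈ L.toList := by
  rw [PySem.Str.isIn_iff_infix]; simp [List.singleton_infix_iff]

-- once the last recorded index is -1 and the sentinel is not alone, the loop body never appends
theorem pv_A_stopped (L : String) (s : List Char) (common : List (String × Int))
    (hlast : (common.getLastD ("", -1)).2 = -1) (hlen : common.length ≠ 1) :
    s.foldl (pvAStep L) common = common := by
  induction s with
  | nil => rfl
  | cons c rest ih =>
    have hstep : pvAStep L common c = common := by
      unfold pvAStep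
      split
      · rw [if_neg]
        rw [not_or, List.getLastD_eq_getLast?] at *
        exact ⟨by omega, hlen⟩
      · rfl
    simp [List.foldl_cons, hstep, ih]

theorem pv_A_loop (L : String) (s : List Char) :
    ∀ (common : List (String × Int)) (nxt : Int),
    (common.getLastD ("", -1)).2 = nxt - 1 → 0 ≤ nxt → nxt ≤ (L.toList.length : Int) →
    (nxt ≠ 0 ∨ common.length = 1) → common ≠ [] →
    s.foldl (pvAStep L) common = common ++ pvChase L.toList s nxt := by
  induction s with
  | nil => intro common nxt _ _ _ _ _; simp [pvChase]
  | cons c rest ih =>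
    intro common nxt hlast h0 hle hcond hne
    by_cases hc : c ∈ L.toList
    · have hin : PySem.Str.isIn (String.ofList [c]) L = true := (pv_isIn_iff c L).mpr hc
      have hstep : pvAStep L common c =
          common ++ [(String.ofList [c], PySem.Chars.findFrom L.toList [c] nxt)] := by
        unfold pvAStep
        rw [if_pos hin]
        simp only [hlast]
        rw [if_pos (by rcases hcond with h | h; exacts [Or.inl (by omega), Or.inr h])]
        have hnn : nxt - 1 + 1 = nxt := by omega
        rw [hnn]
        simp
      rw [List.foldl_cons, hstep]
      rcases hdw : (pvOcc L.toList c).dropWhile (fun j => decide (j < nxt)) with _ | ⟨h, t⟩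
      · have hF : PySem.Chars.findFrom L.toList [c] nxt = -1 := pv_find_eq_nil h0 hle hdw
        rw [hF]
        rw [pv_A_stopped L rest _ (by simp) (by
          rcases common with _ | ⟨x, xs⟩
          · exact absurd rfl hne
          · simp)]
        rw [pvChase, if_pos hc, hdw]
      · obtain ⟨hmem, hnh, hh0, hhlen⟩ := pv_head_occ hdw
        have hF : PySem.Chars.findFrom L.toList [c] nxt = h := pv_find_eq_cons h0 hle hdw
        rw [hF]
        rw [ih (common ++ [(String.ofList [c], h)]) (h + 1) (by simp) (by omega) (by omega)
          (by left; omega) (by simp)]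
        rw [pvChase, if_pos hc, hdw]
        simp
    · have hstep : pvAStep L common c = common := by
        unfold pvAStep
        rw [if_neg (by
          cases hx : PySem.Str.isIn (String.ofList [c]) L
          · simp
          · exact absurd ((pv_isIn_iff c L).mp hx) hc)]
      rw [List.foldl_cons, hstep, ih common nxt hlast h0 hle hcond hne, pvChase, if_neg hc]

-- cursor advance skips exactly the already-consumed (< nxt) prefix
theorem pv_skip_drop (lst : List Int) (nxt : Int) (k : Nat) :
    lst.drop (cc52AltSkip lst nxt k) = (lst.drop k).dropWhile (fun j => decide (j < nxt)) := by
  fun_induction cc52AltSkip lst nxt k with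
  | case1 k hk hlt ih =>
    rw [ih]
    conv_rhs => rw [List.drop_eq_getElem_cons hk, List.dropWhile_cons]
    simp [hlt]
  | case2 k hk hlt =>
    conv_rhs => rw [List.drop_eq_getElem_cons hk, List.dropWhile_cons]
    simp [hlt]
  | case3 k hk =>
    rw [List.drop_eq_nil_of_le (by omega)]
    rfl

-- the initial position dictionary: a char is a key iff it occurs, its value its occurrence list
theorem pv_init_getD (l : List Char) (c : Char) :
    ((PySem.List.enumerate l 0).foldl
      (fun d p => d.modify p.2 [] (fun lst => lst ++ [p.1])) PySem.Dict.empty).getD c [] =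
      pvOcc l c := by
  have hfold : (PySem.List.enumerate l 0).foldl
      (fun d p => d.modify p.2 [] (fun lst => lst ++ [p.1])) PySem.Dict.empty
      = ((PySem.List.enumerate l 0).map (fun p => (p.2, p.1))).foldl
      (fun d q => d.modify q.1 [] (fun lst => lst ++ [q.2])) PySem.Dict.empty := by
    rw [List.foldl_map]
  rw [hfold, PySem.Dict.getD_foldl_modify_append]
  simp only [PySem.Dict.getD_empty, List.nil_append, List.filter_map, List.map_map]
  rfl

theorem pv_init_contains (l : List Char) (c : Char) :
    ((PySem.List.enumerate l 0).foldl
      (fun d p => d.modify p.2 [] (fun lst => lst ++ [p.1])) PySem.Dict.empty).contains c =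
      decide (c ∈ l) := by
  rw [PySem.Dict.contains_eq_decide_mem_keys]
  rw [PySem.Dict.keys_foldl_modify_key (PySem.List.enumerate l 0) (fun p => p.2) []
    (fun _ p lst => lst ++ [p.1]) PySem.Dict.empty]
  simp only [PySem.Dict.keys_empty, PySem.List.map_snd_enumerate]
  have hupd : PySem.Set.update ([] : List Char) l = PySem.Set.ofList l := rfl
  rw [hupd]
  by_cases hc : c ∈ l
  · simp [hc, (PySem.Set.mem_ofList l c).mpr hc]
  · simp [hc]

-- B's loop: pos is the fixed occurrence dictionary; the invariant says each cursor has skipped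
-- only already-consumed (< nxt) occurrence indices
theorem pv_B_loop (l : List Char) (pos : PySem.Dict Char (List Int))
    (hpc : ∀ c, pos.contains c = decide (c ∈ l))
    (hpg : ∀ c, pos.getD c [] = pvOcc l c)
    (s : List Char) :
    ∀ (nxt : Int) (cur : PySem.Dict Char Nat),
    (∀ c, ((pvOcc l c).drop (cur.getD c 0)).dropWhile (fun j => decide (j < nxt)) =
        (pvOcc l c).dropWhile (fun j => decide (j < nxt))) →
    cc52AltLoop pos s nxt cur = pvChase l s nxt := by
  induction s with
  | nil => intro nxt cur _; rfl
  | cons c rest ih =>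
    intro nxt cur hinv
    by_cases hc : c ∈ l
    · have hctrue : pos.contains c = true := by rw [hpc c]; simp [hc]
      have hsome : (pos.get? c).isSome := by
        rw [← PySem.Dict.contains_eq_isSome_get?]; exact hctrue
      obtain ⟨lst, hlst⟩ := Option.isSome_iff_exists.mp hsome
      have hocc' : lst = pvOcc l c := by
        rw [← hpg c]; exact (PySem.Dict.getD_of_get?_eq_some pos [] hlst).symm
      subst hocc'
      rw [cc52AltLoop, hlst]
      rw [pvChase, if_pos hc]
      have hS := pv_skip_drop (pvOcc l c) nxt (cur.getD c 0)
      rw [hinv c] at hS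
      rcases hocc : (pvOcc l c).dropWhile (fun j => decide (j < nxt)) with _ | ⟨h, t⟩
      · rw [hocc] at hS
        have hk : ¬ (cc52AltSkip (pvOcc l c) nxt (cur.getD c 0) < (pvOcc l c).length) := by
          have := List.drop_eq_nil_iff.mp hS; omega
        dsimp only
        rw [dif_neg hk]
      · rw [hocc] at hS
        have hk : cc52AltSkip (pvOcc l c) nxt (cur.getD c 0) < (pvOcc l c).length := by
          by_contra hnk
          rw [List.drop_eq_nil_of_le (by omega)] at hS
          exact (List.cons_ne_nil _ _) hS.symm
        obtain ⟨hmem, hnh, hh0, _⟩ := pv_head_occ hocc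
        have hval : (pvOcc l c)[cc52AltSkip (pvOcc l c) nxt (cur.getD c 0)]'hk = h := by
          have h0lt : 0 < ((pvOcc l c).drop (cc52AltSkip (pvOcc l c) nxt (cur.getD c 0))).length := by
            rw [hS]; simp
          have := List.getElem_drop (xs := pvOcc l c)
            (i := cc52AltSkip (pvOcc l c) nxt (cur.getD c 0)) (j := 0) (h := h0lt)
          have hS0 : ((pvOcc l c).drop (cc52AltSkip (pvOcc l c) nxt (cur.getD c 0)))[0]'h0lt = h := by
            simp [hS]
          simpa using this.symm.trans hS0
        dsimp only
        rw [dif_pos hk, hval]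
        congr 1
        apply ih
        intro c'
        have hmono : ∀ x : Int, decide (x < nxt) = true → decide (x < h + 1) = true := by
          intro x hx; simp at hx ⊢; omega
        by_cases hcc : c' = c
        · subst hcc
          rw [PySem.Dict.getD_insert, if_pos rfl, hS]
          calc (h :: t).dropWhile (fun j => decide (j < h + 1))
              = ((pvOcc l c').dropWhile (fun j => decide (j < nxt))).dropWhile
                  (fun j => decide (j < h + 1)) := by rw [hocc]
            _ = (pvOcc l c').dropWhile (fun j => decide (j < h + 1)) :=
                pv_dropWhile_dropWhile _ _ hmono _
        · rw [PySem.Dict.getD_insert, if_neg hcc]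
          rw [← pv_dropWhile_dropWhile _ _ hmono ((pvOcc l c').drop (cur.getD c' 0)), hinv c',
            pv_dropWhile_dropWhile _ _ hmono (pvOcc l c')]
    · have hnone : pos.get? c = none := by
        rw [PySem.Dict.get?_eq_none_iff_contains]
        rw [hpc c]; simp [hc]
      rw [cc52AltLoop, hnone, pvChase, if_neg hc]
      exact ih nxt cur hinv

-- ===== VERDICT (by name: the statement is the Claim_ definition above) =====
theorem cc52_spec : Claim_equal_cc52 := by
  intro txt1 txt2 _
  unfold Spec_cc52 cc52 cc52_alt
  dsimp only
  set st := if PySem.Str.len txt1 < PySem.Str.len txt2 then (txt1, txt2) else (txt2, txt1) with hst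
  have hfun : (fun common (i : Char) =>
      if PySem.Str.isIn (String.ofList [i]) st.2 then
        let nxtIndex := (common.getLastD ("", -1)).2 + 1
        if nxtIndex ≠ 0 ∨ common.length = 1 then
          common ++ [(String.ofList [i], PySem.Str.findFrom st.2 (String.ofList [i]) nxtIndex)]
        else common
      else common) = pvAStep st.2 := rfl
  rw [hfun]
  rw [pv_A_loop st.2 st.1.toList [("", -1)] 0 (by simp) le_rfl (by positivity) (Or.inr rfl)
    (by simp)]
  rw [pv_B_loop st.2.toList _ (pv_init_contains st.2.toList) (pv_init_getD st.2.toList)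
    st.1.toList 0 PySem.Dict.empty (by intro c; rw [PySem.Dict.getD_empty]; rfl)]
  rw [PySem.List.slice_from_one]
  simp
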